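-- pv_equiv track=rewrite | github.com/devng/code-puzzles | src/devng/adventofcode/day15/day15.py | gen_distribution
-- ===== SOURCE A (Python) =====
-- def gen_distribution(size):
--     n = size + 1
--     for a in range(n):
--         for b in range(n - a):
--             for c in range(n - a - b):
--                 for d in range(n - a - b - c):
--                     if a + b + c + d == size:
--                         yield a, b, c, d
-- ===== SOURCE B (Python) =====
-- def gen_distribution(size):
--     # same tuples in the same order, but the innermost scan is replaced by
--     # computing d = size - a - b - c directly
--     for a in range(size + 1):
--         for b in range(size + 1 - a):
--             for c in range(size + 1 - a - b):
--                 yield a, b, c, size - a - b - c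
-- ===== Notes on version B (the rewrite author's own statement) =====
-- stated objective: faster
-- what changed: drops the innermost loop and its equality test: the fourth component is computed directly as d = size - a - b - c, the unique value A's inner scan finds; intended as faster (O(size^3) vs O(size^4)); measured 17.45x at n=64, the largest size both finished (both are still superlinear and time out at n=256)
import Mathlib
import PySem

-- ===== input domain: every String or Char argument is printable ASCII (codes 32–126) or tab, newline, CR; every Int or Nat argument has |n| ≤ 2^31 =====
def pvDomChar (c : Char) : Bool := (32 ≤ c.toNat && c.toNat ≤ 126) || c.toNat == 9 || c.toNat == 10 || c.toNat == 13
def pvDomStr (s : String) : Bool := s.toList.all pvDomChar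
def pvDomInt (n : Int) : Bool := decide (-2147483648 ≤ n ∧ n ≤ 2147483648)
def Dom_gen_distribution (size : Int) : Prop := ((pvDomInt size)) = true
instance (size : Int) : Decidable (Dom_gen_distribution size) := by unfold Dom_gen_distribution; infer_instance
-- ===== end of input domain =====

-- B drops A's innermost loop: the fourth component is computed as size - a - b - c (intended as faster; measured 17x at n=64, the largest size both finished).


-- ===== PORT A =====
def gen_distribution (size : Int) : List (List Int) :=
  let n := size + 1
  (PySem.List.pyRange 0 n 1).flatMap (fun a =>
    (PySem.List.pyRange 0 (n - a) 1).flatMap (fun b =>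
      (PySem.List.pyRange 0 (n - a - b) 1).flatMap (fun c =>
        (PySem.List.pyRange 0 (n - a - b - c) 1).flatMap (fun d =>
          if a + b + c + d = size then [[a, b, c, d]] else []))))

-- ===== PORT B =====
def gen_distribution_alt (size : Int) : List (List Int) :=
  (PySem.List.pyRange 0 (size + 1) 1).flatMap (fun a =>
    (PySem.List.pyRange 0 (size + 1 - a) 1).flatMap (fun b =>
      (PySem.List.pyRange 0 (size + 1 - a - b) 1).flatMap (fun c =>
        [[a, b, c, size - a - b - c]])))

-- ===== PRECONDITION & SPEC =====
def Spec_gen_distribution (size : Int) (out : List (List Int)) : Prop := out = gen_distribution_alt size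
instance (size : Int) (out : List (List Int)) : Decidable (Spec_gen_distribution size out) := by unfold Spec_gen_distribution; infer_instance

-- ===== CLAIM (what is proved, stated in full; the proofs are below) =====
def Claim_equal_gen_distribution : Prop := ∀ (size : Int), Dom_gen_distribution size → Spec_gen_distribution size (gen_distribution size)

-- ===== LEMMAS AND PROOFS =====

theorem pvFlatMap_congr {α β : Type} (l : List α) (f g : α → List β)
    (h : ∀ a ∈ l, f a = g a) : l.flatMap f = l.flatMap g := by
  induction l with
  | nil => rfl
  | cons x xs ih =>
    simp only [List.flatMap_cons]
    rw [h x (List.mem_cons_self), ih (fun a ha => h a (List.mem_cons_of_mem _ ha))]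

theorem pvFlatMap_ite_nil {α : Type} (l : List Int) (t : Int) (v : List α)
    (ht : t ∉ l) : l.flatMap (fun d => if d = t then v else []) = [] := by
  induction l with
  | nil => rfl
  | cons x xs ih =>
    simp only [List.flatMap_cons]
    rw [if_neg (fun h => ht (by rw [← h]; exact List.mem_cons_self)),
        ih (fun h => ht (List.mem_cons_of_mem _ h))]
    rfl

theorem pvFlatMap_ite_single {α : Type} (l : List Int) (t : Int) (v : List α)
    (hnd : l.Nodup) (ht : t ∈ l) : l.flatMap (fun d => if d = t then v else []) = v := by
  induction l with
  | nil => exact absurd ht (List.not_mem_nil)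
  | cons x xs ih =>
    simp only [List.flatMap_cons]
    rcases List.mem_cons.mp ht with h | h
    · rw [if_pos h.symm, pvFlatMap_ite_nil xs t v (h ▸ (List.nodup_cons.mp hnd).1)]
      simp
    · rw [if_neg (fun he => (List.nodup_cons.mp hnd).1 (by rw [he]; exact h)),
          ih (List.nodup_cons.mp hnd).2 h]
      rfl

-- the innermost loop of A picks exactly d = size - a - b - c
theorem pvInner (size a b c : Int) (h0 : 0 ≤ size - a - b - c) :
    (PySem.List.pyRange 0 (size + 1 - a - b - c) 1).flatMap
      (fun d => if a + b + c + d = size then [[a, b, c, d]] else []) =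
    [[a, b, c, size - a - b - c]] := by
  have hstep : (PySem.List.pyRange 0 (size + 1 - a - b - c) 1).flatMap
      (fun d => if a + b + c + d = size then [[a, b, c, d]] else []) =
      (PySem.List.pyRange 0 (size + 1 - a - b - c) 1).flatMap
      (fun d => if d = size - a - b - c then [[a, b, c, size - a - b - c]] else []) := by
    apply pvFlatMap_congr
    intro d _
    by_cases hd : d = size - a - b - c
    · subst hd; rw [if_pos (by omega), if_pos rfl]
    · rw [if_neg (by omega), if_neg hd]
  rw [hstep]
  exact pvFlatMap_ite_single _ _ _ (PySem.List.nodup_pyRange_one 0 _)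
    ((PySem.List.mem_pyRange_one).mpr ⟨h0, by omega⟩)

-- ===== VERDICT (by name: the statement is the Claim_ definition above) =====
theorem gen_distribution_spec : Claim_equal_gen_distribution := by
  intro size _
  show gen_distribution size = gen_distribution_alt size
  unfold gen_distribution gen_distribution_alt
  apply pvFlatMap_congr
  intro a ha
  apply pvFlatMap_congr
  intro b hb
  apply pvFlatMap_congr
  intro c hc
  have hc' := (PySem.List.mem_pyRange_one).mp hc
  exact pvInner size a b c (by omega)
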